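-- pv_equiv track=rewrite | github.com/Vinix24/vnx-orchestration | scripts/lib/conversation_read_model.py | derive_worktree_root
-- ===== SOURCE A (Python) =====
-- from typing import Dict, List, Optional, Tuple
--
-- def derive_worktree_root(cwd: str, known_roots: List[str]) -> Optional[str]:
--     """Derive worktree root from cwd via path containment (LINK-1).
--
--     Args:
--         cwd: The session's working directory.
--         known_roots: List of known worktree root paths (longest match wins).
--
--     Returns:
--         The worktree root that contains cwd, or None.
--     """
--     if not cwd:
--         return None
--     # Sort by length descending so the most specific root wins
--     for root in sorted(known_roots, key=len, reverse=True):
--         normalized_root = root.rstrip("/")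
--         if cwd == normalized_root or cwd.startswith(normalized_root + "/"):
--             return normalized_root
--     return None
-- ===== SOURCE B (Python) =====
-- def derive_worktree_root(cwd, known_roots):
--     """Single linear pass: keep the first matching root of maximal original length
--     (equivalent to taking the first match of the stable length-descending sort)."""
--     if not cwd:
--         return None
--     best = None
--     best_len = -1
--     for root in known_roots:
--         if len(root) > best_len:
--             normalized = root.rstrip("/")
--             if cwd == normalized or cwd.startswith(normalized + "/"):
--                 best = normalized
--                 best_len = len(root)
--     return best
-- ===== Notes on version B (the rewrite author's own statement) =====
-- stated objective: alternative
-- what changed: Replaced sort-then-first-match (sort by length descending, return first containing root) with a single linear pass that keeps the first matching root of strictly greater original length, eliminating the sort.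
import Mathlib
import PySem

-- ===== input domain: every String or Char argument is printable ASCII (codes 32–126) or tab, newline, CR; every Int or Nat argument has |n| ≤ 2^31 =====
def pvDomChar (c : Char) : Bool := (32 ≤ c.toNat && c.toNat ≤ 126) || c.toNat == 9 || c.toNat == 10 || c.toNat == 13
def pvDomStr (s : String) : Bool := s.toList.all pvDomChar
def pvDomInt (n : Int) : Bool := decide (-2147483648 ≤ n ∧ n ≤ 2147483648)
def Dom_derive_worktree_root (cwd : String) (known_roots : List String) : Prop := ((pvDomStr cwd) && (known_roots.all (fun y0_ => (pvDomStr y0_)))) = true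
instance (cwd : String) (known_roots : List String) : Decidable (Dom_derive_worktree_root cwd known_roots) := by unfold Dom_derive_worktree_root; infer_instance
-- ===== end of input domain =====

-- B replaces A's sort-then-first-match by a single linear pass keeping the first matching
-- root of strictly greater original length, eliminating the sort (objective: alternative).

-- ===== PORT A =====
-- root.rstrip("/"): PySem has no rstrip-with-chars form; ported by hand — drops exactly the
-- trailing '/' characters (exact for this one-character strip set).
def pvRstripSlash (s : String) : String :=
  String.ofList ((s.toList.reverse.dropWhile (fun c => c == '/')).reverse)

-- the 'for root in sorted(...)' loop with its early return
def pvLoopA (cwd : String) : List String → Option String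
  | [] => none
  | root :: rest =>
    let normalized_root := pvRstripSlash root
    if cwd == normalized_root ||
        PySem.Str.startswith cwd (String.ofList (normalized_root.toList ++ ['/'])) then
      some normalized_root
    else
      pvLoopA cwd rest

def derive_worktree_root (cwd : String) (known_roots : List String) : Option String :=
  if cwd == "" then none
  else pvLoopA cwd (PySem.List.sorted known_roots (fun root => PySem.Str.len root) true)

-- ===== PORT B =====
-- one step of B's linear pass: state = (best, best_len)
def pvStepB (cwd : String) (st : Option String × Int) (root : String) : Option String × Int :=
  if PySem.Str.len root > st.2 then
    let normalized := pvRstripSlash root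
    if cwd == normalized ||
        PySem.Str.startswith cwd (String.ofList (normalized.toList ++ ['/'])) then
      (some normalized, PySem.Str.len root)
    else st
  else st

def derive_worktree_root_alt (cwd : String) (known_roots : List String) : Option String :=
  if cwd == "" then none
  else (known_roots.foldl (pvStepB cwd) (none, -1)).1

-- ===== PRECONDITION & SPEC =====
def Spec_derive_worktree_root (cwd : String) (known_roots : List String) (out : Option String) : Prop := out = derive_worktree_root_alt cwd known_roots
instance (cwd : String) (known_roots : List String) (out : Option String) : Decidable (Spec_derive_worktree_root cwd known_roots out) := by unfold Spec_derive_worktree_root; infer_instance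

-- ===== CLAIM (what is proved, stated in full; the proofs are below) =====
def Claim_equal_derive_worktree_root : Prop := ∀ (cwd : String) (known_roots : List String), Dom_derive_worktree_root cwd known_roots → Spec_derive_worktree_root cwd known_roots (derive_worktree_root cwd known_roots)

-- ===== LEMMAS AND PROOFS =====

-- the shared containment test of both Pythons
def pvMatch (cwd root : String) : Bool :=
  cwd == pvRstripSlash root ||
    PySem.Str.startswith cwd (String.ofList ((pvRstripSlash root).toList ++ ['/']))

-- first matching root together with its original length
def pvFF (cwd : String) : List String → Option (String × Int)
  | [] => none
  | r :: rs => if pvMatch cwd r then some (pvRstripSlash r, PySem.Str.len r) else pvFF cwd rs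

-- B's fold state read off a pvFF result
def pvState (o : Option (String × Int)) : Option String × Int :=
  (o.map (·.1), match o with | some (_, k) => k | none => -1)

-- effect of offering one more candidate x to the current first match
def pvNext (cwd x : String) (o : Option (String × Int)) : Option (String × Int) :=
  match o with
  | some (v, k) =>
    if k < PySem.Str.len x then
      (if pvMatch cwd x then some (pvRstripSlash x, PySem.Str.len x) else some (v, k))
    else some (v, k)
  | none => if pvMatch cwd x then some (pvRstripSlash x, PySem.Str.len x) else none

theorem pvFF_cons (cwd r : String) (rs : List String) :
    pvFF cwd (r :: rs) =
      if pvMatch cwd r then some (pvRstripSlash r, PySem.Str.len r) else pvFF cwd rs := rfl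

theorem pvLoopA_cons (cwd r : String) (rs : List String) :
    pvLoopA cwd (r :: rs) =
      if pvMatch cwd r then some (pvRstripSlash r) else pvLoopA cwd rs := rfl

theorem pvStepB_eq (cwd : String) (st : Option String × Int) (root : String) :
    pvStepB cwd st root =
      if PySem.Str.len root > st.2 then
        (if pvMatch cwd root then (some (pvRstripSlash root), PySem.Str.len root) else st)
      else st := rfl

theorem pvLoopA_eq_ff (cwd : String) (ys : List String) :
    pvLoopA cwd ys = (pvFF cwd ys).map (·.1) := by
  induction ys with
  | nil => rfl
  | cons r rs ih =>
    rw [pvLoopA_cons, pvFF_cons]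
    cases h : pvMatch cwd r <;> simp [ih]

theorem pvFF_mem (cwd : String) (ys : List String) (v : String) (k : Int)
    (h : pvFF cwd ys = some (v, k)) : ∃ r ∈ ys, k = PySem.Str.len r := by
  induction ys with
  | nil => simp [pvFF] at h
  | cons y t ih =>
    rw [pvFF_cons] at h
    by_cases hm : pvMatch cwd y = true
    · rw [if_pos hm] at h
      exact ⟨y, by simp, ((Prod.mk.injEq _ _ _ _).mp (Option.some_inj.mp h)).2.symm⟩
    · rw [if_neg hm] at h
      obtain ⟨r, hr, hk⟩ := ih h
      exact ⟨r, by simp [hr], hk⟩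

theorem pvFF_key_le_head (cwd y : String) (t : List String) (v : String) (k : Int)
    (hp : (y :: t).Pairwise (fun a b => PySem.Str.len b ≤ PySem.Str.len a))
    (h : pvFF cwd (y :: t) = some (v, k)) : k ≤ PySem.Str.len y := by
  rw [pvFF_cons] at h
  by_cases hm : pvMatch cwd y = true
  · rw [if_pos hm] at h
    exact le_of_eq ((Prod.mk.injEq _ _ _ _).mp (Option.some_inj.mp h)).2.symm
  · rw [if_neg hm] at h
    obtain ⟨r, hr, hk⟩ := pvFF_mem cwd t v k h
    exact hk ▸ (List.pairwise_cons.mp hp).1 r hr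

theorem pvStep_insertBy (cwd x : String) (ys : List String)
    (hp : ys.Pairwise (fun a b => PySem.Str.len b ≤ PySem.Str.len a)) :
    pvFF cwd (PySem.List.insertBy
        (fun a b => decide (PySem.Str.len b < PySem.Str.len a)) x ys) =
      pvNext cwd x (pvFF cwd ys) := by
  induction ys with
  | nil =>
    show pvFF cwd [x] = pvNext cwd x none
    rw [show pvFF cwd [x] =
        if pvMatch cwd x then some (pvRstripSlash x, PySem.Str.len x) else none from
      pvFF_cons cwd x []]
    rfl
  | cons y t ih =>
    rw [show PySem.List.insertBy
          (fun a b => decide (PySem.Str.len b < PySem.Str.len a)) x (y :: t) =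
        if decide (PySem.Str.len y < PySem.Str.len x) then x :: y :: t
        else y :: PySem.List.insertBy
          (fun a b => decide (PySem.Str.len b < PySem.Str.len a)) x t from rfl]
    by_cases hlt : PySem.Str.len y < PySem.Str.len x
    · simp only [hlt, decide_true, if_true]
      rw [pvFF_cons]
      cases hff : pvFF cwd (y :: t) with
      | none => simp only [pvNext]
      | some p =>
        obtain ⟨v, k⟩ := p
        have hk : k < PySem.Str.len x :=
          lt_of_le_of_lt (pvFF_key_le_head cwd y t v k hp hff) hlt
        simp only [pvNext]
        rw [if_pos hk]
    · simp only [hlt, decide_false, Bool.false_eq_true, if_false]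
      rw [pvFF_cons]
      by_cases hmy : pvMatch cwd y = true
      · rw [if_pos hmy, pvFF_cons, if_pos hmy]
        simp only [pvNext]
        rw [if_neg hlt]
      · rw [if_neg hmy, pvFF_cons, if_neg hmy]
        exact ih (List.pairwise_cons.mp hp).2

theorem pvState_next (cwd x : String) (o : Option (String × Int)) :
    pvStepB cwd (pvState o) x = pvState (pvNext cwd x o) := by
  have h0 : (0 : Int) ≤ PySem.Str.len x := by simp [pysem]
  cases o with
  | none =>
    show pvStepB cwd (none, -1) x = pvState (pvNext cwd x none)
    rw [pvStepB_eq]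
    simp only [pvNext]
    rw [if_pos (show PySem.Str.len x > (none (α := String), (-1 : Int)).2 by
      show (-1 : Int) < PySem.Str.len x; omega)]
    cases hmx : pvMatch cwd x <;> simp [pvState]
  | some p =>
    obtain ⟨v, k⟩ := p
    show pvStepB cwd (some v, k) x = pvState (pvNext cwd x (some (v, k)))
    rw [pvStepB_eq]
    simp only [pvNext]
    by_cases hk : k < PySem.Str.len x
    · rw [if_pos (show PySem.Str.len x > (some v, k).2 from hk), if_pos hk]
      cases hmx : pvMatch cwd x <;> simp [pvState]
    · rw [if_neg (show ¬ PySem.Str.len x > (some v, k).2 from hk), if_neg hk]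
      simp [pvState]

theorem pvFoldB_eq (cwd : String) (xs : List String) :
    xs.foldl (pvStepB cwd) (none, -1) =
      pvState (pvFF cwd (xs.foldl
        (fun acc x => PySem.List.insertBy
          (fun a b => decide (PySem.Str.len b < PySem.Str.len a)) x acc) [])) := by
  induction xs using List.reverseRecOn with
  | nil => rfl
  | append_singleton xs x ih =>
    have hp : (xs.foldl
        (fun acc x => PySem.List.insertBy
          (fun a b => decide (PySem.Str.len b < PySem.Str.len a)) x acc) []).Pairwise
        (fun a b => PySem.Str.len b ≤ PySem.Str.len a) := by
      rw [← PySem.List.sorted_rev_eq_foldl_insertBy xs (fun root => PySem.Str.len root)]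
      exact PySem.List.sorted_pairwise_rev xs _
    rw [List.foldl_append, List.foldl_append]
    simp only [List.foldl_cons, List.foldl_nil]
    rw [ih, pvState_next, pvStep_insertBy cwd x _ hp]

-- ===== VERDICT (by name: the statement is the Claim_ definition above) =====
theorem derive_worktree_root_spec : Claim_equal_derive_worktree_root := by
  intro cwd known_roots _
  show derive_worktree_root cwd known_roots = derive_worktree_root_alt cwd known_roots
  unfold derive_worktree_root derive_worktree_root_alt
  by_cases h : cwd == ""
  · simp [h]
  · simp only [h, Bool.false_eq_true, if_false]
    rw [PySem.List.sorted_rev_eq_foldl_insertBy known_roots (fun root => PySem.Str.len root),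
        pvLoopA_eq_ff, pvFoldB_eq]
    rfl
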